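-- pv_equiv track=rewrite | github.com/gawlowski-mateusz/BLE-5-signal-simulation | bluetooth.py | viterbi_encoder
-- ===== SOURCE A (Python) =====
-- def xor(a, b):
--     if a == b:
--         return '0'
--     else:
--         return '1'
--
-- def viterbi_encoder(input):
--     register = ['0', '0', '0']
--     output_message_p4 = []
--
--     for i in range(0, len(input)):
--         output_message_p4.append(xor(xor(xor(input[i], register[0]), register[1]), register[2]))
--         output_message_p4.append(xor(xor(input[i], register[1]), register[2]))
--         register[2] = register[1]
--         register[1] = register[0]
--         register[0] = input[i]
--
--     return output_message_p4
-- ===== SOURCE B (Python) =====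
-- def xor(a, b):
--     if a == b:
--         return '0'
--     else:
--         return '1'
--
-- def viterbi_encoder(input):
--     # staged vectorized passes: build the three shifted history streams up front,
--     # compute each parity stream as a whole-list pass, then interleave them
--     s1 = ['0'] + input[:-1]
--     s2 = ['0', '0'] + input[:-2]
--     s3 = ['0', '0', '0'] + input[:-3]
--     t = [xor(x, a) for x, a in zip(input, s1)]
--     p1 = [xor(xor(u, b), c) for u, b, c in zip(t, s2, s3)]
--     p2 = [xor(xor(x, b), c) for x, b, c in zip(input, s2, s3)]
--     out = []
--     for a, b in zip(p1, p2):
--         out.append(a)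
--         out.append(b)
--     return out
-- ===== Notes on version B (the rewrite author's own statement) =====
-- stated objective: alternative
-- what changed: Replaced the stateful single-pass shift-register loop by a staged, vectorized pipeline: three shifted history streams are materialized up front, the two parity streams are each computed as a whole-list pass over zipped streams, and the result is produced by interleaving the two streams at the end.
import Mathlib
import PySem

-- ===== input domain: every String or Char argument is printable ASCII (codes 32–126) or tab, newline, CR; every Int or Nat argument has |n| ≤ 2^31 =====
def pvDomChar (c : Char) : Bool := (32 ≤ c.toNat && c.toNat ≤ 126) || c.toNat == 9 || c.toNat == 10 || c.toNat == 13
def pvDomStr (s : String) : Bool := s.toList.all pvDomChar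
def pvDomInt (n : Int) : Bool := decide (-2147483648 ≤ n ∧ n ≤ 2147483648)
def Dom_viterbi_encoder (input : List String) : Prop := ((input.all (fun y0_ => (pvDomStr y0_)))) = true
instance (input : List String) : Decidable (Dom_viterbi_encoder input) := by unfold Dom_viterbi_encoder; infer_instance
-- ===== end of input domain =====

-- B replaces A's stateful shift-register loop by a staged, vectorized pipeline:
-- shifted history streams built up front, two whole-list parity passes, then interleave (objective: alternative).

-- xor, the module helper both versions call
def pyxor (a b : String) : String := if a == b then "0" else "1"

-- ===== PORT A =====
-- A: fold over the input carrying the shift register (r0, r1, r2) and the output list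
def viterbi_encoder (input : List String) : List String :=
  (input.foldl
    (fun (st : (String × String × String) × List String) (x : String) =>
      let r0 := st.1.1; let r1 := st.1.2.1; let r2 := st.1.2.2
      ((x, r0, r1),
        st.2 ++ [pyxor (pyxor (pyxor x r0) r1) r2, pyxor (pyxor x r1) r2]))
    (("0", "0", "0"), [])).2

-- ===== PORT B =====
-- B: shifted history streams (input[:-k] = take (n-k)), two parity streams, interleave
def viterbi_encoder_alt (input : List String) : List String :=
  let n := input.length
  let s1 := "0" :: input.take (n - 1)
  let s2 := "0" :: "0" :: input.take (n - 2)
  let s3 := "0" :: "0" :: "0" :: input.take (n - 3)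
  let t := (input.zip s1).map (fun p => pyxor p.1 p.2)
  let p1 := ((t.zip s2).zip s3).map (fun p => pyxor (pyxor p.1.1 p.1.2) p.2)
  let p2 := ((input.zip s2).zip s3).map (fun p => pyxor (pyxor p.1.1 p.1.2) p.2)
  (p1.zip p2).flatMap (fun p => [p.1, p.2])

-- ===== PRECONDITION & SPEC =====
def Spec_viterbi_encoder (input : List String) (out : List String) : Prop := out = viterbi_encoder_alt input
instance (input : List String) (out : List String) : Decidable (Spec_viterbi_encoder input out) := by unfold Spec_viterbi_encoder; infer_instance

-- ===== CLAIM (what is proved, stated in full; the proofs are below) =====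
def Claim_equal_viterbi_encoder : Prop := ∀ (input : List String), Dom_viterbi_encoder input → Spec_viterbi_encoder input (viterbi_encoder input)

-- ===== LEMMAS AND PROOFS =====

-- the common "rest of the encoding from register (r0, r1, r2)" function
def G : List String → String → String → String → List String
  | [], _, _, _ => []
  | x :: xs, r0, r1, r2 =>
      pyxor (pyxor (pyxor x r0) r1) r2 :: pyxor (pyxor x r1) r2 :: G xs x r0 r1

lemma A_loop (l : List String) (r0 r1 r2 : String) (acc : List String) :
    (l.foldl
      (fun (st : (String × String × String) × List String) (x : String) =>
        ((x, st.1.1, st.1.2.1),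
          st.2 ++ [pyxor (pyxor (pyxor x st.1.1) st.1.2.1) st.1.2.2, pyxor (pyxor x st.1.2.1) st.1.2.2]))
      ((r0, r1, r2), acc)).2 = acc ++ G l r0 r1 r2 := by
  induction l generalizing r0 r1 r2 acc with
  | nil => simp [G]
  | cons x xs ih => simp [G, ih]

-- zip only looks at the first (length of the left list) elements of the right list
lemma zip_congr_take {α β : Type} (l : List α) (s s' : List β)
    (h : s.take l.length = s'.take l.length) : l.zip s = l.zip s' := by
  induction l generalizing s s' with
  | nil => simp
  | cons x xs ih =>
    cases s with
    | nil => cases s' with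
      | nil => rfl
      | cons b bs =>
        simp only [List.length_cons, List.take_nil, List.take_succ_cons] at h
        exact absurd h (by simp)
    | cons a as => cases s' with
      | nil =>
        simp only [List.length_cons, List.take_nil, List.take_succ_cons] at h
        exact absurd h (by simp)
      | cons b bs =>
        simp only [List.length_cons, List.take_succ_cons, List.cons.injEq] at h
        simp [h.1, ih as bs h.2]

-- the staged pipeline with fully general history streams
def stagedP (l s1 s2 s3 : List String) : List String :=
  let t := (l.zip s1).map (fun p => pyxor p.1 p.2)
  let p1 := ((t.zip s2).zip s3).map (fun p => pyxor (pyxor p.1.1 p.1.2) p.2)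
  let p2 := ((l.zip s2).zip s3).map (fun p => pyxor (pyxor p.1.1 p.1.2) p.2)
  (p1.zip p2).flatMap (fun p => [p.1, p.2])

lemma staged_eq_G (l : List String) : ∀ (a b c : String),
    stagedP l (a :: l) (b :: a :: l) (c :: b :: a :: l) = G l a b c := by
  induction l with
  | nil => intro a b c; rfl
  | cons x xs ih =>
    intro a b c
    have h := ih x a b
    simp only [stagedP, G, List.zip_cons_cons, List.map_cons, List.flatMap_cons,
      List.cons_append, List.nil_append] at h ⊢
    rw [h]

lemma take_history (l : List String) (pre : List String) :
    (pre ++ l.take (l.length - pre.length)).take l.length = (pre ++ l).take l.length := by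
  rcases Nat.lt_or_ge l.length pre.length with h | h
  · rw [List.take_append_of_le_length (Nat.le_of_lt h), List.take_append_of_le_length (Nat.le_of_lt h)]
  · have hlen : pre.length ≤ l.length := h
    rw [List.take_append, List.take_append]
    congr 1
    rw [List.take_take]
    congr 1
    omega

lemma alt_eq_staged (input : List String) :
    viterbi_encoder_alt input = stagedP input ("0" :: input) ("0" :: "0" :: input) ("0" :: "0" :: "0" :: input) := by
  have h1 : input.zip ("0" :: input.take (input.length - 1)) = input.zip ("0" :: input) := by
    apply zip_congr_take
    simpa using take_history input ["0"]
  have h2 : ∀ {α : Type} (t : List α), t.length = input.length →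
      t.zip ("0" :: "0" :: input.take (input.length - 2)) = t.zip ("0" :: "0" :: input) := by
    intro α t ht
    apply zip_congr_take
    rw [ht]
    simpa using take_history input ["0", "0"]
  have h3 : ∀ {α : Type} (t : List α), t.length = input.length →
      t.zip ("0" :: "0" :: "0" :: input.take (input.length - 3)) = t.zip ("0" :: "0" :: "0" :: input) := by
    intro α t ht
    apply zip_congr_take
    rw [ht]
    simpa using take_history input ["0", "0", "0"]
  simp only [viterbi_encoder_alt, stagedP, h1]
  have hlt : ((input.zip ("0" :: input)).map (fun p => pyxor p.1 p.2)).length = input.length := by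
    simp only [List.length_map, List.length_zip, List.length_cons]
    omega
  rw [h2 _ hlt, h2 _ rfl]
  have hl2 : (((input.zip ("0" :: input)).map (fun p => pyxor p.1 p.2)).zip ("0" :: "0" :: input)).length = input.length := by
    simp only [List.length_map, List.length_zip, List.length_cons]
    omega
  have hl2' : ((input.zip ("0" :: "0" :: input))).length = input.length := by
    simp only [List.length_zip, List.length_cons]
    omega
  rw [h3 _ hl2, h3 _ hl2']

-- ===== VERDICT (by name: the statement is the Claim_ definition above) =====
theorem viterbi_encoder_spec : Claim_equal_viterbi_encoder := by
  intro input _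
  show viterbi_encoder input = viterbi_encoder_alt input
  have hA : viterbi_encoder input = G input "0" "0" "0" := by
    simpa [viterbi_encoder] using A_loop input "0" "0" "0" []
  rw [hA, alt_eq_staged, staged_eq_G]
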